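-- pv_equiv track=rewrite | github.com/CoBiG2/RAD_Tools | singleton_site_remover.py | singleton_remover
-- ===== SOURCE A (Python) =====
-- def singleton_remover(columns):
--     """
--     Removes any columns that contain singleton sites. Returns any columns that
--     don't contain sigleton sites.
--     """
--     no_singleton_cols = []
--     iter_cols = iter(columns)
--     names = next(iter_cols)
--     no_singleton_cols.append([name + "\t" for name in names])
--     for column in iter_cols:
--         bases = set(column)
--         if "-" in bases:
--             bases.discard("-")
--         if "N" in bases:
--             bases.discard("N")
--         base_counts = [column.count(x) for x in bases]
--         try:
--             if min(base_counts) > 1: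
--                 no_singleton_cols.append(column)
--         except ValueError:
--             pass
--
--     return no_singleton_cols
-- ===== SOURCE B (Python) =====
-- def _scan_runs(s):
--     """Scan a sorted list once, grouping runs of equal adjacent elements.
--     Returns (any_valid, has_singleton): whether some run of a base other than
--     '-'/'N' exists, and whether some such run has length exactly 1."""
--     any_valid = False
--     has_singleton = False
--     i = 0
--     n = len(s)
--     while i < n:
--         j = i + 1
--         while j < n and s[j] == s[i]:
--             j += 1
--         if s[i] != "-" and s[i] != "N":
--             any_valid = True
--             if j - i == 1:
--                 has_singleton = True
--         i = j
--     return any_valid, has_singleton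
--
--
-- def singleton_remover(columns):
--     """
--     Removes any columns that contain singleton sites. Returns any columns that
--     don't contain sigleton sites.
--     """
--     names, *rest = columns
--     out = [[name + "\t" for name in names]]
--     for column in rest:
--         any_valid, has_singleton = _scan_runs(sorted(column))
--         if any_valid and not has_singleton:
--             out.append(column)
--     return out
-- ===== Notes on version B (the rewrite author's own statement) =====
-- stated objective: alternative
-- what changed: Instead of building a set and re-counting each distinct base with column.count (a quadratic inner scan), B sorts each column once and scans the sorted copy in a single pass over runs of equal adjacent elements, keeping the original column iff some non-'-'/'N' run exists and none has length 1.
import Mathlib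
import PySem

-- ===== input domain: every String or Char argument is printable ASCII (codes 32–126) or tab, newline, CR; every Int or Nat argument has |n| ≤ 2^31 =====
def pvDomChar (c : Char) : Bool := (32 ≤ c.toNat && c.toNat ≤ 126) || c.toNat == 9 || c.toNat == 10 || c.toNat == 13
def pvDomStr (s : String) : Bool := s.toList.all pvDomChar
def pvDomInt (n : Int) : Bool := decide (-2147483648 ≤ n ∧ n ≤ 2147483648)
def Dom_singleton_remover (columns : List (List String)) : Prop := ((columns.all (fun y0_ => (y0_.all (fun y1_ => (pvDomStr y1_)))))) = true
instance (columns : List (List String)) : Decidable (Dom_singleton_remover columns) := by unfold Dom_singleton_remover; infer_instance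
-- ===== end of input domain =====

-- B replaces A's per-column set building plus repeated column.count scans by one sort of the
-- column and a single scan over runs of equal adjacent elements (objective: alternative).

-- ===== PORT A =====
-- bases = set(column); discard "-" and "N" (each behind its membership guard, as in A)
def pvBasesA (column : List String) : PySem.Set String :=
  let bases0 : PySem.Set String := PySem.Set.ofList column
  let bases1 := if PySem.Set.contains bases0 "-" then PySem.Set.discard bases0 "-" else bases0
  if PySem.Set.contains bases1 "N" then PySem.Set.discard bases1 "N" else bases1

-- one iteration of A's for-loop; the match on min? is the try/except ValueError
def pvBodyA (acc : List (List String)) (column : List String) : List (List String) :=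
  let base_counts := (pvBasesA column).map (fun x => PySem.List.count column x)
  match PySem.List.min? base_counts (fun c => c) with
  | some m => if 1 < m then acc ++ [column] else acc
  | none => acc

def singleton_remover (columns : List (List String)) : List (List String) :=
  match columns with
  | [] => []  -- unreachable under Pre_ (Python raises StopIteration on next(iter([])))
  | names :: iter_cols =>
    iter_cols.foldl pvBodyA [names.map (fun name => name ++ "\t")]

-- ===== PORT B =====
-- Source B's _scan_runs: the inner while loop groups the run of elements equal to s[i]
-- (takeWhile/dropWhile is exactly that grouping); returns (any_valid, has_singleton)
def pvScanRuns : List String → Bool × Bool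
  | [] => (false, false)
  | x :: xs =>
    let run := xs.takeWhile (fun y => y == x)
    let p := pvScanRuns (xs.dropWhile (fun y => y == x))
    if x = "-" ∨ x = "N" then p
    else (true, p.2 || decide (run.length = 0))
termination_by l => l.length
decreasing_by
  simpa using Nat.lt_succ_of_le (List.length_dropWhile_le (fun y => y == x) xs)

-- one iteration of B's for-loop
def pvBodyB (acc : List (List String)) (column : List String) : List (List String) :=
  let p := pvScanRuns (PySem.List.sorted column (fun x => x) false)
  if p.1 && !p.2 then acc ++ [column] else acc

def singleton_remover_alt (columns : List (List String)) : List (List String) :=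
  match columns with
  | [] => []  -- unreachable under Pre_ (Python raises ValueError unpacking [])
  | names :: rest =>
    rest.foldl pvBodyB [names.map (fun name => name ++ "\t")]

-- ===== PRECONDITION & SPEC =====
-- Pre_ excludes only the empty input, on which the Python A raises StopIteration.
def Pre_singleton_remover (columns : List (List String)) : Prop := columns ≠ []
instance (columns : List (List String)) : Decidable (Pre_singleton_remover columns) := by
  unfold Pre_singleton_remover; infer_instance
def pvWitness_singleton_remover : List (List String) := [["a", "b"], ["A", "A"], ["A", "C"]]

def Spec_singleton_remover (columns : List (List String)) (out : List (List String)) : Prop := out = singleton_remover_alt columns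
instance (columns : List (List String)) (out : List (List String)) : Decidable (Spec_singleton_remover columns out) := by unfold Spec_singleton_remover; infer_instance

-- ===== CLAIM (what is proved, stated in full; the proofs are below) =====
def Claim_equal_singleton_remover : Prop := ∀ (columns : List (List String)), Dom_singleton_remover columns → Pre_singleton_remover columns → Spec_singleton_remover columns (singleton_remover columns)

-- ===== LEMMAS AND PROOFS =====

-- a conditioned discard removes v whether or not the guard fires
lemma pv_cond_discard (s : PySem.Set String) (v y : String) :
    (y ∈ (if PySem.Set.contains s v then PySem.Set.discard s v else s)) ↔ y ∈ s ∧ y ≠ v := by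
  split_ifs with h
  · exact PySem.Set.mem_discard s v y
  · have hv : v ∉ s := fun hm => h ((PySem.Set.contains_iff s v).mpr hm)
    exact ⟨fun hy => ⟨hy, fun e => hv (e ▸ hy)⟩, And.left⟩

lemma pv_mem_basesA (column : List String) (y : String) :
    y ∈ pvBasesA column ↔ y ∈ column ∧ y ≠ "-" ∧ y ≠ "N" := by
  unfold pvBasesA
  rw [pv_cond_discard, pv_cond_discard, PySem.Set.mem_ofList, and_assoc]

-- in a sorted list, everything after the run of the head is strictly greater than the head
set_option maxHeartbeats 1000000 in
lemma pv_rest_gt {x : String} {xs : List String}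
    (h : (x :: xs).Pairwise (fun a b => a ≤ b)) :
    ∀ z ∈ xs.dropWhile (fun y => y == x), x < z := by
  cases hr : xs.dropWhile (fun y => y == x) with
  | nil => simp
  | cons h1 t =>
    have hsub : (h1 :: t).Sublist xs := hr ▸ List.dropWhile_sublist (fun y => y == x)
    have hrp : (h1 :: t).Pairwise (fun a b => a ≤ b) := h.of_cons.sublist hsub
    have hh1 : x ≤ h1 := List.rel_of_pairwise_cons h (hsub.mem (List.mem_cons_self))
    have hne : (h1 == x) = false := by
      have hp := List.head_dropWhile_not (fun y => y == x)
        (by rw [hr]; simp : xs.dropWhile (fun y => y == x) ≠ [])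
      simpa [hr] using hp
    have hx1 : x < h1 :=
      lt_of_le_of_ne hh1 (fun e => by simp [← e] at hne)
    intro z hz
    rcases List.mem_cons.mp hz with rfl | hz'
    · exact hx1
    · exact lt_of_lt_of_le hx1 (List.rel_of_pairwise_cons hrp hz')

-- the single run scan of a sorted list decides "some valid base" and "some valid singleton"
set_option maxHeartbeats 1000000 in
lemma pvScanRuns_spec :
    ∀ (n : Nat) (l : List String), l.length ≤ n → l.Pairwise (fun a b => a ≤ b) →
    pvScanRuns l = (decide (∃ z ∈ l, z ≠ "-" ∧ z ≠ "N"),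
      decide (∃ z ∈ l, (z ≠ "-" ∧ z ≠ "N") ∧ l.count z = 1)) := by
  intro n
  induction n with
  | zero =>
    intro l hl _
    have : l = [] := List.eq_nil_of_length_eq_zero (Nat.le_zero.mp hl)
    subst this; rw [pvScanRuns]; simp
  | succ n ih =>
    intro l hl hp
    cases l with
    | nil => rw [pvScanRuns]; simp
    | cons x xs =>
      have hsplit : xs.takeWhile (fun y => y == x) ++ xs.dropWhile (fun y => y == x) = xs :=
        List.takeWhile_append_dropWhile
      set run := xs.takeWhile (fun y => y == x) with hrundef
      set rest := xs.dropWhile (fun y => y == x) with hrestdef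
      have hrunx : ∀ z ∈ run, z = x := by
        intro z hz
        rw [hrundef] at hz
        have hz2 : (z == x) = true := by simpa using List.mem_takeWhile_imp hz
        exact eq_of_beq hz2
      have hgt : ∀ z ∈ rest, x < z := pv_rest_gt hp
      have hrestp : rest.Pairwise (fun a b => a ≤ b) :=
        hp.of_cons.sublist (List.dropWhile_sublist (fun y => y == x))
      have hlen : rest.length ≤ n := by
        have h1 := List.length_dropWhile_le (fun y => y == x) xs
        rw [← hrestdef] at h1
        have h2 : xs.length + 1 ≤ n + 1 := by simpa using hl
        omega
      have IH := ih rest hlen hrestp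
      have hxnotrest : x ∉ rest := fun hx => lt_irrefl x (hgt x hx)
      have hrunc : run.count x = run.length :=
        List.count_eq_length.mpr (fun b hb => (hrunx b hb).symm)
      have hcx : (x :: xs).count x = run.length + 1 := by
        rw [← hsplit]
        simp [List.count_append, hrunc, List.count_eq_zero.mpr hxnotrest]
      have hcother : ∀ z ∈ rest, (x :: xs).count z = rest.count z := by
        intro z hz
        have hzx : z ≠ x := ne_of_gt (hgt z hz)
        have hzr : run.count z = 0 := List.count_eq_zero.mpr (fun hm => hzx (hrunx z hm))
        have hxz : ¬ x = z := fun e => hzx e.symm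
        rw [← hsplit]
        simp [List.count_append, hzr, hxz]
      have hmem : ∀ z, z ∈ x :: xs ↔ z = x ∨ z ∈ rest := by
        intro z
        constructor
        · intro hz
          rcases List.mem_cons.mp hz with rfl | hz'
          · exact Or.inl rfl
          · rw [← hsplit] at hz'
            rcases List.mem_append.mp hz' with hzr | hzr
            · exact Or.inl (hrunx z hzr)
            · exact Or.inr hzr
        · rintro (rfl | hz')
          · exact List.mem_cons_self
          · exact List.mem_cons_of_mem _ (by rw [← hsplit]; exact List.mem_append_right _ hz')
      have hfst : (∃ z ∈ x :: xs, z ≠ "-" ∧ z ≠ "N") ↔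
          ((x ≠ "-" ∧ x ≠ "N") ∨ ∃ z ∈ rest, z ≠ "-" ∧ z ≠ "N") := by
        constructor
        · rintro ⟨z, hz, hv⟩
          rcases (hmem z).mp hz with rfl | hz'
          · exact Or.inl hv
          · exact Or.inr ⟨z, hz', hv⟩
        · rintro (hv | ⟨z, hz, hv⟩)
          · exact ⟨x, List.mem_cons_self, hv⟩
          · exact ⟨z, (hmem z).mpr (Or.inr hz), hv⟩
      have hsnd : (∃ z ∈ x :: xs, (z ≠ "-" ∧ z ≠ "N") ∧ (x :: xs).count z = 1) ↔
          (((x ≠ "-" ∧ x ≠ "N") ∧ run.length = 0) ∨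
            ∃ z ∈ rest, (z ≠ "-" ∧ z ≠ "N") ∧ rest.count z = 1) := by
        constructor
        · rintro ⟨z, hz, hv, hc⟩
          rcases (hmem z).mp hz with rfl | hz'
          · rw [hcx] at hc
            exact Or.inl ⟨hv, by omega⟩
          · rw [hcother z hz'] at hc
            exact Or.inr ⟨z, hz', hv, hc⟩
        · rintro (⟨hv, hr0⟩ | ⟨z, hz, hv, hc⟩)
          · exact ⟨x, List.mem_cons_self, hv, by rw [hcx, hr0]⟩
          · exact ⟨z, (hmem z).mpr (Or.inr hz), hv, by rw [hcother z hz]; exact hc⟩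
      by_cases hv : x = "-" ∨ x = "N"
      · have hnv : ¬ (x ≠ "-" ∧ x ≠ "N") := by tauto
        have heq : pvScanRuns (x :: xs) = pvScanRuns rest := by
          rcases hv with rfl | rfl <;> (rw [pvScanRuns]; simp [hrestdef])
        rw [heq, IH]
        have e1 : (∃ z ∈ rest, z ≠ "-" ∧ z ≠ "N") ↔ (∃ z ∈ x :: xs, z ≠ "-" ∧ z ≠ "N") :=
          ⟨fun h => hfst.mpr (Or.inr h), fun h => (hfst.mp h).resolve_left hnv⟩
        have e2 : (∃ z ∈ rest, (z ≠ "-" ∧ z ≠ "N") ∧ rest.count z = 1) ↔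
            (∃ z ∈ x :: xs, (z ≠ "-" ∧ z ≠ "N") ∧ (x :: xs).count z = 1) :=
          ⟨fun h => hsnd.mpr (Or.inr h),
            fun h => (hsnd.mp h).resolve_left (fun hx => hnv hx.1)⟩
        rw [decide_eq_decide.mpr e1, decide_eq_decide.mpr e2]
      · have hvx : x ≠ "-" ∧ x ≠ "N" := by tauto
        have heq : pvScanRuns (x :: xs) =
            (true, (pvScanRuns rest).2 || decide (run.length = 0)) := by
          rw [pvScanRuns]; simp [hv, hrestdef, hrundef]
        rw [heq, IH]
        refine congrArg₂ Prod.mk ?_ ?_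
        · exact (decide_eq_true ⟨x, List.mem_cons_self, hvx⟩).symm
        · have hdo : ∀ (P Q : Prop) [Decidable P] [Decidable Q],
              (decide P || decide Q) = decide (P ∨ Q) := by
            intro P Q _ _
            by_cases hP : P <;> by_cases hQ : Q <;> simp [hP, hQ]
          rw [hdo]
          refine decide_eq_decide.mpr ?_
          constructor
          · rintro (h | h0)
            · exact hsnd.mpr (Or.inr h)
            · exact hsnd.mpr (Or.inl ⟨hvx, h0⟩)
          · intro h
            rcases hsnd.mp h with ⟨_, h0⟩ | h'
            · exact Or.inr h0
            · exact Or.inl h'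

-- the two per-column loop bodies agree
lemma pv_body_eq (acc : List (List String)) (column : List String) :
    pvBodyA acc column = pvBodyB acc column := by
  have hpair : (PySem.List.sorted column (fun x => x) false).Pairwise (fun a b => a ≤ b) :=
    PySem.List.sorted_pairwise column (fun x => x)
  have hscan := pvScanRuns_spec (PySem.List.sorted column (fun x => x) false).length
    (PySem.List.sorted column (fun x => x) false) (le_refl _) hpair
  have hscan1 : (pvScanRuns (PySem.List.sorted column (fun x => x) false)).1
      = decide (∃ z ∈ PySem.List.sorted column (fun x => x) false, z ≠ "-" ∧ z ≠ "N") := by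
    rw [hscan]
  have hscan2 : (pvScanRuns (PySem.List.sorted column (fun x => x) false)).2
      = decide (∃ z ∈ PySem.List.sorted column (fun x => x) false, (z ≠ "-" ∧ z ≠ "N") ∧
        (PySem.List.sorted column (fun x => x) false).count z = 1) := by
    rw [hscan]
  have hperm : (PySem.List.sorted column (fun x => x) false).Perm column :=
    PySem.List.sorted_perm column (fun x => x) false
  have hEs : (∃ z ∈ PySem.List.sorted column (fun x => x) false, z ≠ "-" ∧ z ≠ "N") ↔
      (∃ z ∈ column, z ≠ "-" ∧ z ≠ "N") := by
    constructor <;> rintro ⟨z, hz, hv⟩ <;>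
      exact ⟨z, by simpa [PySem.List.mem_sorted] using hz, hv⟩
  have hEs1 : (∃ z ∈ PySem.List.sorted column (fun x => x) false, (z ≠ "-" ∧ z ≠ "N") ∧
        (PySem.List.sorted column (fun x => x) false).count z = 1) ↔
      (∃ z ∈ column, (z ≠ "-" ∧ z ≠ "N") ∧ column.count z = 1) := by
    constructor <;> rintro ⟨z, hz, hv, hc⟩ <;>
      exact ⟨z, by simpa [PySem.List.mem_sorted] using hz, hv, by
        first
        | (rw [← hperm.count_eq z]; exact hc)
        | (rw [hperm.count_eq z]; exact hc)⟩
  show (match PySem.List.min? ((pvBasesA column).map (fun x => PySem.List.count column x))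
        (fun c => c) with
      | some m => if 1 < m then acc ++ [column] else acc
      | none => acc) =
    (if ((pvScanRuns (PySem.List.sorted column (fun x => x) false)).1
        && !(pvScanRuns (PySem.List.sorted column (fun x => x) false)).2) = true
      then acc ++ [column] else acc)
  rcases hmin : PySem.List.min? ((pvBasesA column).map (fun x => PySem.List.count column x))
      (fun c => c) with _ | m
  · have hce := (PySem.List.min?_eq_none_iff _ _).mp hmin
    have hbe : pvBasesA column = [] := List.map_eq_nil_iff.mp hce
    have hno : ¬ ∃ z ∈ column, z ≠ "-" ∧ z ≠ "N" := by
      rintro ⟨z, hz, hv⟩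
      have hzb : z ∈ pvBasesA column := (pv_mem_basesA column z).mpr ⟨hz, hv⟩
      rw [hbe] at hzb
      simp at hzb
    have d1 : decide (∃ z ∈ PySem.List.sorted column (fun x => x) false,
        z ≠ "-" ∧ z ≠ "N") = false := decide_eq_false (fun h => hno (hEs.mp h))
    have hb : ((pvScanRuns (PySem.List.sorted column (fun x => x) false)).1
        && !(pvScanRuns (PySem.List.sorted column (fun x => x) false)).2) = false := by
      rw [hscan1, d1, Bool.false_and]
    rw [hb]
    show acc = if false = true then acc ++ [column] else acc
    simp
  · have hm : m ∈ (pvBasesA column).map (fun x => PySem.List.count column x) :=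
      PySem.List.min?_mem hmin
    have hmin' := PySem.List.min?_isMin hmin
    obtain ⟨xb, hxb, hxc⟩ := List.mem_map.mp hm
    obtain ⟨hxcol, hxv⟩ := (pv_mem_basesA column xb).mp hxb
    by_cases h1 : 1 < m
    · have hAtrue : ∃ z ∈ column, z ≠ "-" ∧ z ≠ "N" := ⟨xb, hxcol, hxv⟩
      have hnoS : ¬ ∃ z ∈ column, (z ≠ "-" ∧ z ≠ "N") ∧ column.count z = 1 := by
        rintro ⟨z, hz, hv, hc⟩
        have hzb : z ∈ pvBasesA column := (pv_mem_basesA column z).mpr ⟨hz, hv⟩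
        have hzc : PySem.List.count column z ∈
            (pvBasesA column).map (fun x => PySem.List.count column x) :=
          List.mem_map.mpr ⟨z, hzb, rfl⟩
        have hle := hmin' _ hzc
        rw [PySem.List.count_eq, hc] at hle
        omega
      have d1 : decide (∃ z ∈ PySem.List.sorted column (fun x => x) false,
          z ≠ "-" ∧ z ≠ "N") = true := decide_eq_true (hEs.mpr hAtrue)
      have d2 : decide (∃ z ∈ PySem.List.sorted column (fun x => x) false,
          (z ≠ "-" ∧ z ≠ "N") ∧ (PySem.List.sorted column (fun x => x) false).count z = 1)
          = false := decide_eq_false (fun h => hnoS (hEs1.mp h))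
      have hb : ((pvScanRuns (PySem.List.sorted column (fun x => x) false)).1
          && !(pvScanRuns (PySem.List.sorted column (fun x => x) false)).2) = true := by
        rw [hscan1, hscan2, d1, d2, Bool.not_false, Bool.true_and]
      rw [hb]
      show (if 1 < m then acc ++ [column] else acc) = if true = true then acc ++ [column] else acc
      rw [if_pos h1]
      simp
    · have hpos : 0 < column.count xb := List.count_pos_iff.mpr hxcol
      have hS : ∃ z ∈ column, (z ≠ "-" ∧ z ≠ "N") ∧ column.count z = 1 :=
        ⟨xb, hxcol, hxv, by rw [PySem.List.count_eq] at hxc; omega⟩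
      have d2 : decide (∃ z ∈ PySem.List.sorted column (fun x => x) false,
          (z ≠ "-" ∧ z ≠ "N") ∧ (PySem.List.sorted column (fun x => x) false).count z = 1)
          = true := decide_eq_true (hEs1.mpr hS)
      have hb : ((pvScanRuns (PySem.List.sorted column (fun x => x) false)).1
          && !(pvScanRuns (PySem.List.sorted column (fun x => x) false)).2) = false := by
        rw [hscan2, d2, Bool.not_true, Bool.and_false]
      rw [hb]
      show (if 1 < m then acc ++ [column] else acc) = if false = true then acc ++ [column] else acc
      rw [if_neg h1]
      simp

-- ===== VERDICT (by name: the statement is the Claim_ definition above) =====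
theorem singleton_remover_spec : Claim_equal_singleton_remover := by
  intro columns _ hpre
  unfold Spec_singleton_remover
  cases columns with
  | nil => exact absurd rfl hpre
  | cons names rest =>
    have hbody : pvBodyA = pvBodyB := funext fun acc => funext fun col => pv_body_eq acc col
    simp only [singleton_remover, singleton_remover_alt, hbody]
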